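-- pv_equiv track=rewrite | github.com/SocioFi-Technology/inzohra-ai | services/ingestion/app/extractors/schedule.py | _classify_schedule_type
-- ===== SOURCE A (Python) =====
-- _DOOR_KEYWORDS: set[str] = {"DOOR", "HARDWARE", "FIRE"}
--
-- _WINDOW_KEYWORDS: set[str] = {"WINDOW", "U-FACTOR", "SHGC", "NCO"}
--
-- def _classify_schedule_type(headers: list[str]) -> str:
--     """Determine schedule_type from header names."""
--     headers_upper = {h.upper() for h in headers}
--
--     # Check for door keywords
--     if (
--         _DOOR_KEYWORDS & headers_upper
--         or any("DOOR" in h or "HW" in h for h in headers_upper)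
--     ):
--         return "door_schedule"
--
--     # Check for window keywords
--     if _WINDOW_KEYWORDS & headers_upper or any(
--         "WINDOW" in h or "WIN" in h for h in headers_upper
--     ):
--         return "window_schedule"
--
--     # Check for wall keywords
--     if any("WALL" in h or "ASSEMBLY" in h for h in headers_upper):
--         return "wall_schedule"
--
--     return "schedule"
-- ===== SOURCE B (Python) =====
-- _DOOR_KEYWORDS: set[str] = {"DOOR", "HARDWARE", "FIRE"}
--
-- _WINDOW_KEYWORDS: set[str] = {"WINDOW", "U-FACTOR", "SHGC", "NCO"}
--
-- def _classify_schedule_type(headers: list[str]) -> str: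
--     """Single pass over headers accumulating three flags."""
--     has_door = has_window = has_wall = False
--     for raw in headers:
--         h = raw.upper()
--         if h in ("DOOR", "HARDWARE", "FIRE") or "DOOR" in h or "HW" in h:
--             has_door = True
--         if h in ("WINDOW", "U-FACTOR", "SHGC", "NCO") or "WINDOW" in h or "WIN" in h:
--             has_window = True
--         if "WALL" in h or "ASSEMBLY" in h:
--             has_wall = True
--     if has_door:
--         return "door_schedule"
--     if has_window:
--         return "window_schedule"
--     if has_wall:
--         return "wall_schedule"
--     return "schedule"
-- ===== Notes on version B (the rewrite author's own statement) =====
-- stated objective: simpler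
-- what changed: Replaces the uppercased-set construction, two set intersections and three separate any() scans with one pass over the headers that accumulates three boolean flags, then a plain precedence chain.
import Mathlib
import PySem

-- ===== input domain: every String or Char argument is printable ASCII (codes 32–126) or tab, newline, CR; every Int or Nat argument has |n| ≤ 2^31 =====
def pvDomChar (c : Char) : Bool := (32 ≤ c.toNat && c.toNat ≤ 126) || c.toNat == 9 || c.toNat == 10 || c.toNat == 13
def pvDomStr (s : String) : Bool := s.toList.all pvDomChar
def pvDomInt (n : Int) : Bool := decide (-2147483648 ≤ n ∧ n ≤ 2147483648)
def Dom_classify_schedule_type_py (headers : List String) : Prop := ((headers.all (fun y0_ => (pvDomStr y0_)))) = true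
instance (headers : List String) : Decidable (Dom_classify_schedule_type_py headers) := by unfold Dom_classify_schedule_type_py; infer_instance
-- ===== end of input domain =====

-- B replaces A's uppercased-set construction, two set intersections and three any() scans
-- with one pass over the headers accumulating three boolean flags (objective: simpler).

-- ===== PORT A =====
def pvDoorKeywords : PySem.Set String := PySem.Set.ofList ["DOOR", "HARDWARE", "FIRE"]
def pvWindowKeywords : PySem.Set String := PySem.Set.ofList ["WINDOW", "U-FACTOR", "SHGC", "NCO"]

def classify_schedule_type_py (headers : List String) : String :=
  let headers_upper : PySem.Set String := PySem.Set.ofList (headers.map (fun h => PySem.Str.upper h))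
  if !(PySem.Set.inter pvDoorKeywords headers_upper).isEmpty
      || headers_upper.any (fun h => PySem.Str.isIn "DOOR" h || PySem.Str.isIn "HW" h) then
    "door_schedule"
  else if !(PySem.Set.inter pvWindowKeywords headers_upper).isEmpty
      || headers_upper.any (fun h => PySem.Str.isIn "WINDOW" h || PySem.Str.isIn "WIN" h) then
    "window_schedule"
  else if headers_upper.any (fun h => PySem.Str.isIn "WALL" h || PySem.Str.isIn "ASSEMBLY" h) then
    "wall_schedule"
  else
    "schedule"

-- ===== PORT B =====
def pvDoorP (h : String) : Bool :=
  ["DOOR", "HARDWARE", "FIRE"].contains h || PySem.Str.isIn "DOOR" h || PySem.Str.isIn "HW" h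

def pvWindowP (h : String) : Bool :=
  ["WINDOW", "U-FACTOR", "SHGC", "NCO"].contains h || PySem.Str.isIn "WINDOW" h || PySem.Str.isIn "WIN" h

def pvWallP (h : String) : Bool :=
  PySem.Str.isIn "WALL" h || PySem.Str.isIn "ASSEMBLY" h

def classify_schedule_type_py_alt (headers : List String) : String :=
  let flags := headers.foldl
    (fun (s : Bool × Bool × Bool) raw =>
      let h := PySem.Str.upper raw
      (s.1 || pvDoorP h, s.2.1 || pvWindowP h, s.2.2 || pvWallP h))
    (false, false, false)
  if flags.1 then "door_schedule"
  else if flags.2.1 then "window_schedule"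
  else if flags.2.2 then "wall_schedule"
  else "schedule"

-- ===== PRECONDITION & SPEC =====
def Spec_classify_schedule_type_py (headers : List String) (out : String) : Prop := out = classify_schedule_type_py_alt headers
instance (headers : List String) (out : String) : Decidable (Spec_classify_schedule_type_py headers out) := by unfold Spec_classify_schedule_type_py; infer_instance

-- ===== CLAIM (what is proved, stated in full; the proofs are below) =====
def Claim_equal_classify_schedule_type_py : Prop := ∀ (headers : List String), Dom_classify_schedule_type_py headers → Spec_classify_schedule_type_py headers (classify_schedule_type_py headers)

-- ===== LEMMAS AND PROOFS =====

-- B's flag loop computes the three list-level `any`s.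
lemma pv_foldl_flags (l : List String) (a b c : Bool) :
    l.foldl
      (fun (s : Bool × Bool × Bool) raw =>
        let h := PySem.Str.upper raw
        (s.1 || pvDoorP h, s.2.1 || pvWindowP h, s.2.2 || pvWallP h))
      (a, b, c)
    = (a || l.any (fun r => pvDoorP (PySem.Str.upper r)),
       b || l.any (fun r => pvWindowP (PySem.Str.upper r)),
       c || l.any (fun r => pvWallP (PySem.Str.upper r))) := by
  induction l generalizing a b c with
  | nil => simp
  | cons x xs ih => simp [ih, Bool.or_assoc]

-- A's "keyword-set intersection nonempty or any(substring)" over the uppercased set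
-- equals the per-header test B performs, over the plain list.
lemma pv_cond_eq (kw : List String) (p : String → Bool) (l : List String) :
    (!(PySem.Set.inter (PySem.Set.ofList kw) (PySem.Set.ofList (l.map (fun h => PySem.Str.upper h)))).isEmpty
      || (PySem.Set.ofList (l.map (fun h => PySem.Str.upper h))).any p)
    = l.any (fun r => kw.contains (PySem.Str.upper r) || p (PySem.Str.upper r)) := by
  rw [Bool.eq_iff_iff]
  simp only [Bool.or_eq_true, Bool.not_eq_true', List.isEmpty_eq_false_iff_exists_mem,
    List.any_eq_true, PySem.Set.mem_inter, PySem.Set.mem_ofList, List.mem_map,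
    List.contains_eq_mem, decide_eq_true_eq]
  constructor
  · rintro (⟨x, ⟨hkw, r, hr, rfl⟩⟩ | ⟨x, ⟨r, hr, rfl⟩, hp⟩)
    · exact ⟨r, hr, Or.inl hkw⟩
    · exact ⟨r, hr, Or.inr hp⟩
  · rintro ⟨r, hr, h | h⟩
    · exact Or.inl ⟨_, h, r, hr, rfl⟩
    · exact Or.inr ⟨_, ⟨r, hr, rfl⟩, h⟩

lemma pv_wall_eq (p : String → Bool) (l : List String) :
    (PySem.Set.ofList (l.map (fun h => PySem.Str.upper h))).any p
    = l.any (fun r => p (PySem.Str.upper r)) := by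
  rw [Bool.eq_iff_iff]
  simp only [List.any_eq_true, PySem.Set.mem_ofList, List.mem_map]
  constructor
  · rintro ⟨x, ⟨r, hr, rfl⟩, hp⟩; exact ⟨r, hr, hp⟩
  · rintro ⟨r, hr, hp⟩; exact ⟨_, ⟨r, hr, rfl⟩, hp⟩

-- ===== VERDICT (by name: the statement is the Claim_ definition above) =====
theorem classify_schedule_type_py_spec : Claim_equal_classify_schedule_type_py := by
  intro headers _
  unfold Spec_classify_schedule_type_py classify_schedule_type_py classify_schedule_type_py_alt
  simp only [pv_foldl_flags, Bool.false_or]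
  rw [pvDoorKeywords, pvWindowKeywords, pv_cond_eq, pv_cond_eq, pv_wall_eq]
  simp only [pvDoorP, pvWindowP, pvWallP, Bool.or_assoc]
  rfl
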